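-- pv_equiv track=rewrite | github.com/billzorn/titanic | titanfp/quantifind/search.py | reorder_for_bfs
-- ===== SOURCE A (Python) =====
-- def reorder_for_bfs(seq, elt):
--     """Reorder a list to contain the closest things to some starting point first.
--
--     The starting point must be an element of the list.
--     If it is the first item, return the list as-is.
--     If it is the last item, reverse the list.
--     Otherwise, return the representative first, then the item after it,
--     then the one before it, then the next one after it, and so on.
--
--     Returns an iterator for the list (or reversed list, or the interleaved reordering)
--     """
--     seq = list(seq)
--     idx = seq.index(elt)
--     if idx == 0:
--         yield from iter(seq)
--     elif idx == len(seq) - 1: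
--         yield from reversed(seq)
--     else:
--         yield seq[idx]
--         for i in range(1, len(seq)):
--             upper = idx + i
--             if upper < len(seq):
--                 yield seq[upper]
--             lower = idx - i
--             if lower >= 0:
--                 yield seq[lower]
-- ===== SOURCE B (Python) =====
-- def reorder_for_bfs(seq, elt):
--     """Yield elt first, then interleave the tail after it with the reversed prefix before it."""
--     seq = list(seq)
--     idx = seq.index(elt)
--     yield seq[idx]
--     right = seq[idx + 1:]
--     left = seq[:idx][::-1]
--     n = min(len(right), len(left))
--     for r, l in zip(right, left):
--         yield r
--         yield l
--     yield from right[n:]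
--     yield from left[n:]
-- ===== Notes on version B (the rewrite author's own statement) =====
-- stated objective: simpler
-- what changed: A's three special-case branches and its offset loop with two bounds checks per step are replaced by slicing the list into the part after elt and the reversed part before it, interleaving them with zip, and appending the leftover tail; the single interleave covers first/last/middle uniformly.
import Mathlib
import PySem

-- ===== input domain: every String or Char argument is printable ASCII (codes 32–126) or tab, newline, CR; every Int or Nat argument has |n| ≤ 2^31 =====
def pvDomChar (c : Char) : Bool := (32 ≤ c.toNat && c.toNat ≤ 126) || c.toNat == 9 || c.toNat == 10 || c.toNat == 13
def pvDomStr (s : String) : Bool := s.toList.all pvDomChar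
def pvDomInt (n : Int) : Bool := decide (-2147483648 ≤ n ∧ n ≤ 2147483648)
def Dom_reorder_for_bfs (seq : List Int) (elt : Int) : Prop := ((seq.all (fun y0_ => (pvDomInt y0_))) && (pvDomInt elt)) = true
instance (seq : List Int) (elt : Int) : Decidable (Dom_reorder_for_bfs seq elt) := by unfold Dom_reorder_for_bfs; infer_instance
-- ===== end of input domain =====

-- B replaces A's three branches and offset loop (two bounds checks per step) by one uniform
-- slice-and-interleave (zip of the part after elt with the reversed part before it, plus leftovers);
-- both are generators in Python, the equivalence is about the fully-consumed sequence of yields.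

-- ===== PORT A =====
def reorder_for_bfs (seq : List Int) (elt : Int) : List Int :=
  match PySem.List.index? seq elt with
  | none => []   -- seq.index(elt) raises ValueError; excluded by Pre_
  | some idx =>
    let n : Int := seq.length
    if (idx : Int) = 0 then
      seq
    else if (idx : Int) = n - 1 then
      seq.reverse
    else
      (PySem.List.pyRange 1 n 1).foldl (fun acc i =>
        let upper := (idx : Int) + i
        let acc1 := if upper < n then acc ++ [PySem.List.pyGetD seq upper 0] else acc
        let lower := (idx : Int) - i
        if 0 ≤ lower then acc1 ++ [PySem.List.pyGetD seq lower 0] else acc1)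
        [PySem.List.pyGetD seq (idx : Int) 0]

-- ===== PORT B =====
def reorder_for_bfs_alt (seq : List Int) (elt : Int) : List Int :=
  match PySem.List.index? seq elt with
  | none => []   -- seq.index(elt) raises ValueError; excluded by Pre_
  | some idx =>
    let right := PySem.List.slice seq (some ((idx : Int) + 1)) none
    let left := (PySem.List.slice seq none (some (idx : Int))).reverse
    let n := min right.length left.length
    PySem.List.pyGetD seq (idx : Int) 0 ::
      ((right.zip left).foldl (fun acc p => acc ++ [p.1, p.2]) []
        ++ right.drop n ++ left.drop n)

-- ===== PRECONDITION & SPEC =====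
-- Pre_ excludes exactly the inputs where seq.index(elt) raises ValueError (elt not in seq).
def Pre_reorder_for_bfs (seq : List Int) (elt : Int) : Prop := elt ∈ seq
instance (seq : List Int) (elt : Int) : Decidable (Pre_reorder_for_bfs seq elt) := by unfold Pre_reorder_for_bfs; infer_instance
def pvWitness_reorder_for_bfs : List Int × Int := ([5, 1, 7, 2], 7)

def Spec_reorder_for_bfs (seq : List Int) (elt : Int) (out : List Int) : Prop := out = reorder_for_bfs_alt seq elt
instance (seq : List Int) (elt : Int) (out : List Int) : Decidable (Spec_reorder_for_bfs seq elt out) := by unfold Spec_reorder_for_bfs; infer_instance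

-- ===== CLAIM (what is proved, stated in full; the proofs are below) =====
def Claim_equal_reorder_for_bfs : Prop := ∀ (seq : List Int) (elt : Int), Dom_reorder_for_bfs seq elt → Pre_reorder_for_bfs seq elt → Spec_reorder_for_bfs seq elt (reorder_for_bfs seq elt)

-- ===== LEMMAS AND PROOFS =====

-- Core interleaving fact: indexing both halves over a long enough range equals
-- zip-interleave plus the leftover tail of the longer half.
lemma pv_interleave_range (m : Nat) : ∀ (R L : List Int), R.length ≤ m → L.length ≤ m →
    (List.range m).flatMap (fun j => R[j]?.toList ++ L[j]?.toList)
      = (R.zip L).flatMap (fun p => [p.1, p.2])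
          ++ R.drop (min R.length L.length) ++ L.drop (min R.length L.length) := by
  induction m with
  | zero =>
    intro R L hR hL
    have : R = [] := List.eq_nil_of_length_eq_zero (Nat.le_zero.mp hR)
    have hL' : L = [] := List.eq_nil_of_length_eq_zero (Nat.le_zero.mp hL)
    subst this; subst hL'; simp
  | succ m ih =>
    intro R L hR hL
    rw [List.range_succ_eq_map]
    match R, L with
    | [], [] => simp
    | r :: rs, [] =>
      have := ih rs [] (by simpa using Nat.lt_succ_iff.mp (by simpa using hR)) (by simp)
      simp only [List.flatMap_cons, List.flatMap_map] at *
      simpa using this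
    | [], l :: ls =>
      have := ih [] ls (by simp) (by simpa using Nat.lt_succ_iff.mp (by simpa using hL))
      simp only [List.flatMap_cons, List.flatMap_map] at *
      simpa using this
    | r :: rs, l :: ls =>
      have := ih rs ls (by simpa using Nat.lt_succ_iff.mp (by simpa using hR))
        (by simpa using Nat.lt_succ_iff.mp (by simpa using hL))
      simp only [List.flatMap_cons, List.flatMap_map] at *
      simp [this]

-- Pointwise description of one iteration of A's loop, as indexing into the two halves.
lemma pv_step_eq (seq : List Int) (idx : Nat) (hlt : idx < seq.length) (k : Nat) :
    ((if (idx : Int) + (1 + (k : Int)) < (seq.length : Int) then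
        [PySem.List.pyGetD seq ((idx : Int) + (1 + (k : Int))) 0] else []) ++
     (if 0 ≤ (idx : Int) - (1 + (k : Int)) then
        [PySem.List.pyGetD seq ((idx : Int) - (1 + (k : Int))) 0] else []))
    = (seq.drop (idx + 1))[k]?.toList ++ ((seq.take idx).reverse)[k]?.toList := by
  have h1 : (seq.drop (idx + 1))[k]?.toList
      = (if (idx : Int) + (1 + (k : Int)) < (seq.length : Int) then
          [PySem.List.pyGetD seq ((idx : Int) + (1 + (k : Int))) 0] else []) := by
    by_cases hk : idx + 1 + k < seq.length
    · rw [if_pos (by omega)]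
      have hcast : (idx : Int) + (1 + (k : Int)) = ((idx + 1 + k : Nat) : Int) := by push_cast; ring
      rw [hcast, PySem.List.pyGetD_natCast]
      have hk' : k < (seq.drop (idx + 1)).length := by simp [List.length_drop]; omega
      simp [List.getElem?_eq_getElem hk', List.getElem_drop, List.getD_eq_getElem?_getD,
        List.getElem?_eq_getElem hk]
    · rw [if_neg (by omega)]
      have : (seq.drop (idx + 1)).length ≤ k := by simp [List.length_drop]; omega
      simp [List.getElem?_eq_none this]
  have hLlen : ((seq.take idx).reverse).length = idx := by
    simp [List.length_take]; omega
  have h2 : ((seq.take idx).reverse)[k]?.toList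
      = (if 0 ≤ (idx : Int) - (1 + (k : Int)) then
          [PySem.List.pyGetD seq ((idx : Int) - (1 + (k : Int))) 0] else []) := by
    by_cases hk : k < idx
    · rw [if_pos (by omega)]
      have hcast : (idx : Int) - (1 + (k : Int)) = ((idx - 1 - k : Nat) : Int) := by omega
      rw [hcast, PySem.List.pyGetD_natCast]
      have hk' : k < ((seq.take idx).reverse).length := by omega
      have hj : idx - 1 - k < seq.length := by omega
      have : ((seq.take idx).reverse)[k] = seq[idx - 1 - k] := by
        rw [List.getElem_reverse]
        rw [List.getElem_take]
        congr 1
        simp [List.length_take]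
        omega
      simp [List.getElem?_eq_getElem hk', this, List.getD_eq_getElem?_getD,
        List.getElem?_eq_getElem hj]
    · rw [if_neg (by omega)]
      have : ((seq.take idx).reverse).length ≤ k := by omega
      simp [List.getElem?_eq_none this]
  rw [h1, h2]

theorem reorder_for_bfs_spec : Claim_equal_reorder_for_bfs := by
  intro seq elt _ hpre
  unfold Spec_reorder_for_bfs reorder_for_bfs reorder_for_bfs_alt
  obtain ⟨idx, hidx⟩ := Option.isSome_iff_exists.mp
    ((PySem.List.index?_isSome_iff (xs := seq) (v := elt)).mpr hpre)
  obtain ⟨hlt, hget, -⟩ := PySem.List.getElem_of_index?_eq_some hidx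
  simp only [hidx]
  -- shared rewrites
  have hhead : PySem.List.pyGetD seq (idx : Int) 0 = seq[idx] := by
    rw [PySem.List.pyGetD_natCast]
    simp [List.getD_eq_getElem?_getD, List.getElem?_eq_getElem hlt]
  have hright : PySem.List.slice seq (some ((idx : Int) + 1)) none = seq.drop (idx + 1) := by
    rw [PySem.List.slice_from seq (a := (idx : Int) + 1) (by omega)]
    congr 1
  have hleft : PySem.List.slice seq none (some (idx : Int)) = seq.take idx := by
    rw [PySem.List.slice_to seq (b := (idx : Int)) (by omega)]
    congr 1
  simp only [hright, hleft, hhead]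
  rw [PySem.List.foldl_append_eq_flatMap]
  by_cases h0 : idx = 0
  · subst h0
    rw [if_pos (by norm_num)]
    cases seq with
    | nil => simp at hlt
    | cons a t => simp
  · rw [if_neg (by exact_mod_cast h0)]
    by_cases h1 : (idx : Int) = (seq.length : Int) - 1
    · rw [if_pos h1]
      have hdrop : seq.drop (idx + 1) = [] := by
        apply List.drop_eq_nil_of_le
        omega
      have hseq : seq.take idx ++ seq[idx] :: seq.drop (idx + 1) = seq := by
        rw [List.getElem_cons_drop hlt, List.take_append_drop]
      rw [hdrop] at hseq
      conv_lhs => rw [← hseq]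
      simp [hdrop]
    · rw [if_neg h1]
      have hbody : (fun (acc : List Int) (i : Int) =>
            let upper := (idx : Int) + i
            let acc1 := if upper < (seq.length : Int) then acc ++ [PySem.List.pyGetD seq upper 0] else acc
            let lower := (idx : Int) - i
            if 0 ≤ lower then acc1 ++ [PySem.List.pyGetD seq lower 0] else acc1)
          = (fun acc i => acc ++
              ((if (idx : Int) + i < (seq.length : Int) then [PySem.List.pyGetD seq ((idx : Int) + i) 0] else []) ++
               (if 0 ≤ (idx : Int) - i then [PySem.List.pyGetD seq ((idx : Int) - i) 0] else []))) := by
        funext acc i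
        simp only []
        split_ifs <;> simp
      rw [hbody, PySem.List.foldl_append_eq_flatMap]
      rw [PySem.List.pyRange_one]
      rw [List.flatMap_map]
      have hrange : ((seq.length : Int) - 1).toNat = seq.length - 1 := by omega
      rw [hrange]
      have hg : (fun k : Nat =>
            ((if (idx : Int) + (1 + (k : Int)) < (seq.length : Int) then
                [PySem.List.pyGetD seq ((idx : Int) + (1 + (k : Int))) 0] else []) ++
             (if 0 ≤ (idx : Int) - (1 + (k : Int)) then
                [PySem.List.pyGetD seq ((idx : Int) - (1 + (k : Int))) 0] else [])))
          = (fun k => (seq.drop (idx + 1))[k]?.toList ++ ((seq.take idx).reverse)[k]?.toList) :=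
        funext fun k => pv_step_eq seq idx hlt k
      have hmain := pv_interleave_range (seq.length - 1) (seq.drop (idx + 1)) ((seq.take idx).reverse)
        (by simp [List.length_drop]; omega) (by simp [List.length_take]; omega)
      rw [show (fun k : Nat => (if (idx : Int) + (1 + (k : Int)) < (seq.length : Int) then
                [PySem.List.pyGetD seq ((idx : Int) + (1 + (k : Int))) 0] else []) ++
             (if 0 ≤ (idx : Int) - (1 + (k : Int)) then
                [PySem.List.pyGetD seq ((idx : Int) - (1 + (k : Int))) 0] else []))
          = (fun k => (seq.drop (idx + 1))[k]?.toList ++ ((seq.take idx).reverse)[k]?.toList) from hg]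
      rw [hmain]
      simp
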